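-- pv_equiv track=rewrite | github.com/SakshatRao/DigitBoard | DigitBoard_UI/User_Interface.py | convert_digits_to_str
-- ===== SOURCE A (Python) =====
-- def convert_digits_to_str(digits, cursor_pos):
--     digits_str = []
--     for digit_idx, digit in enumerate(digits):
--         if(digit_idx == cursor_pos):
--             digits_str.append("|")
--         digits_str.append(str(digit))
--     if(len(digits) == cursor_pos):
--         digits_str.append("|")
--     return digits_str
-- ===== SOURCE B (Python) =====
-- def convert_digits_to_str(digits, cursor_pos):
--     out = [str(d) for d in digits]
--     if 0 <= cursor_pos <= len(digits):
--         out.insert(cursor_pos, "|")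
--     return out
-- ===== Notes on version B (the rewrite author's own statement) =====
-- stated objective: simpler
-- what changed: Replaces A's per-element cursor-index branch inside the loop (plus a trailing end-of-list check) with a plain stringification pass followed by a single guarded insert of the marker.
import Mathlib
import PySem

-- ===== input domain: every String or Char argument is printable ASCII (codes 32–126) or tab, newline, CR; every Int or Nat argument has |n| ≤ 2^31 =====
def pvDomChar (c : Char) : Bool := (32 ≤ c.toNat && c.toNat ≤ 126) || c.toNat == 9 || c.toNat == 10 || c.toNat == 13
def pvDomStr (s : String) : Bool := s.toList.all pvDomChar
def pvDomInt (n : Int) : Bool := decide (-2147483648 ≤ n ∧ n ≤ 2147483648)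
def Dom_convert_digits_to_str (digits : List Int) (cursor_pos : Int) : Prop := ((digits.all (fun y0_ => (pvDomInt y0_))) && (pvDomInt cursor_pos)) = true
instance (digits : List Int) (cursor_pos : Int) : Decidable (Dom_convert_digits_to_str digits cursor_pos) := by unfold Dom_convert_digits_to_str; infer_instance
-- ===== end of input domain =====

-- B replaces A's per-element cursor branch with one stringification pass plus a single guarded insert (simpler decomposition).

-- ===== PORT A =====
def convert_digits_to_str (digits : List Int) (cursor_pos : Int) : List String :=
  let digits_str :=
    (PySem.List.enumerate digits 0).foldl
      (fun acc p =>
        (if p.1 == cursor_pos then acc ++ ["|"] else acc) ++ [PySem.Int.toStr p.2]) []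
  if (digits.length : Int) == cursor_pos then digits_str ++ ["|"] else digits_str

-- ===== PORT B =====
def convert_digits_to_str_alt (digits : List Int) (cursor_pos : Int) : List String :=
  let out := digits.map PySem.Int.toStr
  if 0 ≤ cursor_pos ∧ cursor_pos ≤ (digits.length : Int) then
    PySem.List.insert out cursor_pos "|"
  else out

-- ===== PRECONDITION & SPEC =====
def Spec_convert_digits_to_str (digits : List Int) (cursor_pos : Int) (out : List String) : Prop := out = convert_digits_to_str_alt digits cursor_pos
instance (digits : List Int) (cursor_pos : Int) (out : List String) : Decidable (Spec_convert_digits_to_str digits cursor_pos out) := by unfold Spec_convert_digits_to_str; infer_instance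

-- ===== CLAIM (what is proved, stated in full; the proofs are below) =====
def Claim_equal_convert_digits_to_str : Prop := ∀ (digits : List Int) (cursor_pos : Int), Dom_convert_digits_to_str digits cursor_pos → Spec_convert_digits_to_str digits cursor_pos (convert_digits_to_str digits cursor_pos)

-- ===== LEMMAS AND PROOFS =====

-- A's loop over `enumerate`, started at index s, equals the stringified list with "|"
-- inserted at position cursor_pos − s when that index falls inside the list.
theorem loopA (l : List Int) (s cursor_pos : Int) (acc : List String) :
    (PySem.List.enumerate l s).foldl
      (fun acc p =>
        (if p.1 == cursor_pos then acc ++ ["|"] else acc) ++ [PySem.Int.toStr p.2]) acc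
    = acc ++ (if s ≤ cursor_pos ∧ cursor_pos < s + l.length then
        (l.map PySem.Int.toStr).take (cursor_pos - s).toNat
          ++ "|" :: (l.map PySem.Int.toStr).drop (cursor_pos - s).toNat
      else l.map PySem.Int.toStr) := by
  induction l generalizing s acc with
  | nil =>
    rw [PySem.List.enumerate_nil, List.foldl_nil,
      if_neg (by simp only [List.length_nil, Nat.cast_zero]; omega)]
    simp
  | cons x xs ih =>
    rw [PySem.List.enumerate_cons, List.foldl_cons, ih]
    simp only [List.map_cons, List.length_cons]
    by_cases hs : s = cursor_pos
    · subst hs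
      rw [if_pos (by simp), if_neg (by push_cast; omega),
        if_pos (by omega), show (s - s).toNat = 0 by omega]
      simp
    · rw [if_neg (by simp [hs])]
      by_cases h : s + 1 ≤ cursor_pos ∧ cursor_pos < s + 1 + (xs.length : Int)
      · rw [if_pos h, if_pos (by push_cast; omega)]
        have hk : (cursor_pos - s).toNat = (cursor_pos - (s + 1)).toNat + 1 := by omega
        rw [hk]
        simp
      · rw [if_neg h, if_neg (by push_cast; omega)]
        simp

-- ===== VERDICT (by name: the statement is the Claim_ definition above) =====
theorem pyInsertPipe (l : List String) (cp : Int) (h0 : 0 ≤ cp)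
    (hle : cp ≤ (l.length : Int)) :
    PySem.List.insert l cp "|" = l.take cp.toNat ++ "|" :: l.drop cp.toNat := by
  have h1 : cp = ((cp.toNat : Nat) : Int) := by omega
  have h2 : (((cp.toNat : Nat) : Int)).toNat = cp.toNat := by omega
  rw [h1, PySem.List.insert_natCast _ _ _ (by omega), h2]

theorem convert_digits_to_str_spec : Claim_equal_convert_digits_to_str := by
  intro digits cursor_pos _
  show convert_digits_to_str digits cursor_pos = convert_digits_to_str_alt digits cursor_pos
  unfold convert_digits_to_str convert_digits_to_str_alt
  rw [loopA]
  simp only [List.nil_append, Int.sub_zero, beq_iff_eq]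
  split_ifs with h1 h2 h3 h4 h5
  all_goals try (exfalso; omega)
  · have hc : cursor_pos.toNat = (digits.map PySem.Int.toStr).length := by
      simp; omega
    rw [pyInsertPipe _ _ (by omega) (by simp; omega), hc,
      List.take_of_length_le le_rfl, List.drop_of_length_le le_rfl]
  · rw [pyInsertPipe _ _ (by omega) (by simp; omega)]
  · rfl
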